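-- pv_equiv track=rewrite | github.com/Bandi120424/Algorithm_Python | 백준/Gold/10986. 나머지 합/나머지 합.py | remainder_info
-- ===== SOURCE A (Python) =====
-- def remainder_info(modulo, numbers):
--     remainder_inf = {i:0 for i in range(modulo)}
--     remainder_inf[0] = 1
--
--     n_sum = 0
--     for num in numbers:
--         n_sum += num
--         remainder_inf[n_sum%modulo] += 1
--
--     return remainder_inf
-- ===== SOURCE B (Python) =====
-- def remainder_info(modulo, numbers):
--     # Stage 1: materialize all prefix sums (including the empty prefix 0).
--     prefix = [0]
--     for num in numbers:
--         prefix.append(prefix[-1] + num)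
--     # Stage 2: tally the remainders into a zero-filled histogram.
--     hist = {i: 0 for i in range(modulo)}
--     for s in prefix:
--         hist[s % modulo] += 1
--     return hist
-- ===== Notes on version B (the rewrite author's own statement) =====
-- stated objective: alternative
-- what changed: B splits A's single interleaved loop (running sum + dict update) into two independent stages: first materialize the list of all prefix sums (starting with 0 for the empty prefix), then tally each prefix sum's remainder into the zero-filled histogram, so no running-sum state or pre-seeded count for key 0 is needed.
-- outside the precondition, e.g. on remainder_info(0, []): A returns {0: 1}, B raises ZeroDivisionError; on remainder_info(-3, [3, 3]): A returns {0: 3}, B raises KeyError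
import Mathlib
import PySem

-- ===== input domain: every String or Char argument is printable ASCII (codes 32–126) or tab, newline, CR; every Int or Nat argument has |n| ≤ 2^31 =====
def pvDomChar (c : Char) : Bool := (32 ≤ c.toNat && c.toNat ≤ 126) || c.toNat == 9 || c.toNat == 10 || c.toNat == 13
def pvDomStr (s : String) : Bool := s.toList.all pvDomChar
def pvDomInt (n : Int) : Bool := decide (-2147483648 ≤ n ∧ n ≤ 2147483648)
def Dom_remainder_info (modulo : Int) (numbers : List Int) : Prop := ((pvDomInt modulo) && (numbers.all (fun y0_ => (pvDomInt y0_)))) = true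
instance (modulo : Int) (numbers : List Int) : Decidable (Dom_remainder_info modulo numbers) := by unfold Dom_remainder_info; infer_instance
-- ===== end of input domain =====

-- B replaces A's single interleaved loop by two independent stages (build the prefix-sum
-- list, then tally remainders into the zero-filled histogram); alternative decomposition, same cost.
-- Pre_ excludes non-positive modulo: there B raises (ZeroDivisionError/KeyError) while A
-- raises too except in accidental corners (empty numbers, or every prefix remainder 0).


-- ===== PORT A =====
def remainder_info (modulo : Int) (numbers : List Int) : List (Int × Int) :=
  -- remainder_inf = {i:0 for i in range(modulo)}
  let d0 : PySem.Dict Int Int :=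
    (PySem.List.pyRange 0 modulo 1).foldl (fun d i => d.insert i 0) PySem.Dict.empty
  -- remainder_inf[0] = 1
  let d1 := d0.insert 0 1
  -- n_sum = 0; for num in numbers: n_sum += num; remainder_inf[n_sum % modulo] += 1
  let st := numbers.foldl
    (fun (st : Int × PySem.Dict Int Int) num =>
      let s := st.1 + num
      let k := PySem.Int.mod s modulo
      (s, st.2.insert k (st.2.getD k 0 + 1)))
    (0, d1)
  st.2.items

-- ===== PORT B =====
def remainder_info_alt (modulo : Int) (numbers : List Int) : List (Int × Int) :=
  -- prefix = [0]; for num in numbers: prefix.append(prefix[-1] + num)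
  let prefix_ := numbers.foldl
    (fun acc num => acc ++ [PySem.List.pyGetD acc (-1) 0 + num]) [0]
  -- hist = {i: 0 for i in range(modulo)}
  let h0 : PySem.Dict Int Int :=
    (PySem.List.pyRange 0 modulo 1).foldl (fun d i => d.insert i 0) PySem.Dict.empty
  -- for s in prefix: hist[s % modulo] += 1
  let h1 := prefix_.foldl
    (fun d s =>
      let k := PySem.Int.mod s modulo
      d.insert k (d.getD k 0 + 1)) h0
  h1.items

-- ===== PRECONDITION & SPEC =====
-- Pre_ excludes non-positive modulo: there B raises (ZeroDivisionError on the 0 % 0 of the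
-- empty prefix, KeyError for a negative modulo), while A returns only in accidental corners
-- (empty numbers, or every prefix sum's remainder already 0).
def Pre_remainder_info (modulo : Int) (numbers : List Int) : Prop := 0 < modulo
instance (modulo : Int) (numbers : List Int) : Decidable (Pre_remainder_info modulo numbers) := by unfold Pre_remainder_info; infer_instance
def pvWitness_remainder_info : Int × List Int := (3, [4, -1, 2])

def Spec_remainder_info (modulo : Int) (numbers : List Int) (out : List (Int × Int)) : Prop := out = remainder_info_alt modulo numbers
instance (modulo : Int) (numbers : List Int) (out : List (Int × Int)) : Decidable (Spec_remainder_info modulo numbers out) := by unfold Spec_remainder_info; infer_instance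

-- ===== CLAIM (what is proved, stated in full; the proofs are below) =====
def Claim_equal_remainder_info : Prop := ∀ (modulo : Int) (numbers : List Int), Dom_remainder_info modulo numbers → Pre_remainder_info modulo numbers → Spec_remainder_info modulo numbers (remainder_info modulo numbers)

-- ===== LEMMAS AND PROOFS =====

-- the list of running sums of ns started from s (without the start itself)
def pvSums (s : Int) : List Int → List Int
  | [] => []
  | n :: ns => (s + n) :: pvSums (s + n) ns

-- Stage 1 of B builds exactly acc ++ pvSums (last acc) ns
theorem pvPrefix_eq (ns : List Int) (pre : List Int) (s : Int) :
    ns.foldl (fun acc num => acc ++ [PySem.List.pyGetD acc (-1) 0 + num]) (pre ++ [s])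
      = (pre ++ [s]) ++ pvSums s ns := by
  induction ns generalizing pre s with
  | nil => simp [pvSums]
  | cons n ns ih =>
    simp only [List.foldl_cons, PySem.List.pyGetD_neg_one_append_singleton, pvSums]
    have := ih (pre ++ [s]) (s + n)
    simpa [List.append_assoc] using this

-- A's interleaved loop equals folding the increment over the running sums
theorem pvLoopA_eq (m : Int) (ns : List Int) (s : Int) (d : PySem.Dict Int Int) :
    (ns.foldl
      (fun (st : Int × PySem.Dict Int Int) num =>
        let s' := st.1 + num
        let k := PySem.Int.mod s' m
        (s', st.2.insert k (st.2.getD k 0 + 1)))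
      (s, d)).2
    = (pvSums s ns).foldl
        (fun d t =>
          let k := PySem.Int.mod t m
          d.insert k (d.getD k 0 + 1)) d := by
  induction ns generalizing s d with
  | nil => rfl
  | cons n ns ih => simpa [pvSums] using ih (s + n) _

-- looking up any key inserted by the zero-fill comprehension
theorem pvGetD_zero_fill (l : List Int) (d : PySem.Dict Int Int) (k : Int) :
    (l.foldl (fun d i => d.insert i 0) d).getD k 0 = if k ∈ l then 0 else d.getD k 0 := by
  induction l generalizing d with
  | nil => simp
  | cons i l ih =>
    simp only [List.foldl_cons, ih, PySem.Dict.getD_insert, List.mem_cons]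
    by_cases hk : k ∈ l
    · simp [hk]
    · by_cases hki : k = i <;> simp [hk, hki]

-- ===== VERDICT (by name: the statement is the Claim_ definition above) =====
theorem remainder_info_spec : Claim_equal_remainder_info := by
  intro m ns _ hm
  unfold Pre_remainder_info at hm
  unfold Spec_remainder_info remainder_info remainder_info_alt
  dsimp only
  have hpre := pvPrefix_eq ns [] 0
  simp only [List.nil_append] at hpre
  rw [hpre, pvLoopA_eq]
  have hcons : ([0] ++ pvSums 0 ns : List Int) = 0 :: pvSums 0 ns := rfl
  rw [hcons, List.foldl_cons]
  have h0 : PySem.Int.mod 0 m = 0 := by simp [PySem.Int.mod]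
  have hfill : ((PySem.List.pyRange 0 m 1).foldl
      (fun (d : PySem.Dict Int Int) i => d.insert i 0) PySem.Dict.empty).getD 0 0 = 0 := by
    rw [pvGetD_zero_fill]
    have hmem : (0 : Int) ∈ PySem.List.pyRange 0 m 1 := by
      rw [PySem.List.mem_pyRange_one]; omega
    simp [hmem]
  simp only [h0, hfill, zero_add]
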